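-- pv_equiv track=rewrite | github.com/maciekniewielki/AdventOfCode2021 | Python/day12/day12.py | small_can_be_added
-- ===== SOURCE A (Python) =====
-- from collections import Counter
--
-- def is_small(cave):
--     return cave.islower()
--
-- def small_can_be_added(current_path, cave, allow_duplicate):
--     if cave == "end":
--         return True
--
--     cnt = Counter(current_path)
--     if cave not in cnt:
--         return True
--     if not allow_duplicate:
--         return False
--
--     for c in cnt:
--         if cnt[c] > 1 and is_small(c):
--             return False
--     return True
-- ===== SOURCE B (Python) =====
-- def is_small(cave):
--     return cave.islower()
--
-- def small_can_be_added(current_path, cave, allow_duplicate):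
--     if cave == "end":
--         return True
--     if cave not in current_path:
--         return True
--     if not allow_duplicate:
--         return False
--     sp = sorted(current_path)
--     for a, b in zip(sp, sp[1:]):
--         if a == b and is_small(a):
--             return False
--     return True
-- ===== Notes on version B (the rewrite author's own statement) =====
-- stated objective: alternative
-- what changed: Replaces A's Counter frequency table plus a scan over its keys by sorting the path and scanning adjacent pairs of the sorted list for an equal small-cave pair (a repeated element in a sorted list is always adjacent).
import Mathlib
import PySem

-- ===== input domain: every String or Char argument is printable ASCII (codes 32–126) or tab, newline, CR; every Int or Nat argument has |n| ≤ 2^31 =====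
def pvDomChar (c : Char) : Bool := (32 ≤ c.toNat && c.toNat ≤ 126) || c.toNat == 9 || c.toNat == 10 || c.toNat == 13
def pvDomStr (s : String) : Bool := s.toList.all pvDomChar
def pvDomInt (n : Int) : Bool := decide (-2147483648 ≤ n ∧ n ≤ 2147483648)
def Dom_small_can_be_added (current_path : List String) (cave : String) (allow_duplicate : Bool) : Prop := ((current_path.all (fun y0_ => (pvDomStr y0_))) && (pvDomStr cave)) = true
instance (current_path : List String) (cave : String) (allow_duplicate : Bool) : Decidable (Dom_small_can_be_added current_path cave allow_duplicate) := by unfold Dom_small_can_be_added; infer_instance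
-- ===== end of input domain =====

-- B replaces A's Counter table plus key scan by sorting the path and scanning adjacent pairs
-- of the sorted list for an equal small-cave pair (objective: alternative algorithm).

-- str.islower(): at least one cased char and no uppercase char (exact on the ASCII domain,
-- where the cased characters are exactly the letters); ported by hand from char-level PySem.
def is_small (cave : String) : Bool :=
  cave.toList.any PySem.Chars.islower && !(cave.toList.any PySem.Chars.isupper)

-- ===== PORT A =====
def small_can_be_added (current_path : List String) (cave : String) (allow_duplicate : Bool) : Bool :=
  if cave == "end" then true
  else
    let cnt : PySem.Dict String Int := PySem.Dict.counter current_path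
    if !(cnt.contains cave) then true
    else if !allow_duplicate then false
    else
      -- 'for c in cnt: if cnt[c] > 1 and is_small(c): return False' / 'return True'
      !(cnt.keys.any (fun c => decide (cnt.getD c 0 > 1) && is_small c))

-- ===== PORT B =====
-- 'for a, b in zip(sp, sp[1:]): if a == b and is_small(a): return False' / 'return True'
def adjSmallDup : List String → Bool
  | a :: b :: rest => if a == b && is_small a then true else adjSmallDup (b :: rest)
  | _ => false

def small_can_be_added_alt (current_path : List String) (cave : String) (allow_duplicate : Bool) : Bool :=
  if cave == "end" then true
  else if !(current_path.contains cave) then true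
  else if !allow_duplicate then false
  else !(adjSmallDup (PySem.List.sorted current_path (fun x => x) false))

-- ===== PRECONDITION & SPEC =====
def Spec_small_can_be_added (current_path : List String) (cave : String) (allow_duplicate : Bool) (out : Bool) : Prop := out = small_can_be_added_alt current_path cave allow_duplicate
instance (current_path : List String) (cave : String) (allow_duplicate : Bool) (out : Bool) : Decidable (Spec_small_can_be_added current_path cave allow_duplicate out) := by unfold Spec_small_can_be_added; infer_instance

-- ===== CLAIM (what is proved, stated in full; the proofs are below) =====
def Claim_equal_small_can_be_added : Prop := ∀ (current_path : List String) (cave : String) (allow_duplicate : Bool), Dom_small_can_be_added current_path cave allow_duplicate → Spec_small_can_be_added current_path cave allow_duplicate (small_can_be_added current_path cave allow_duplicate)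

-- ===== LEMMAS AND PROOFS =====

-- In a ≤-sorted list an adjacent equal small pair exists iff some small element repeats.
lemma adjSmallDup_iff (l : List String) (h : l.Pairwise (· ≤ ·)) :
    adjSmallDup l = true ↔ ∃ c, is_small c = true ∧ 2 ≤ l.count c := by
  induction l with
  | nil => simp [adjSmallDup]
  | cons a t ih =>
    cases t with
    | nil =>
      simp only [adjSmallDup, Bool.false_eq_true, false_iff]
      rintro ⟨c, _, hc⟩
      have : List.count c [a] ≤ 1 := by
        rw [List.count_cons]; simp; split <;> omega
      omega
    | cons b rest =>
      have hab : a ≤ b := (List.pairwise_cons.mp h).1 b List.mem_cons_self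
      have htail : (b :: rest).Pairwise (· ≤ ·) := (List.pairwise_cons.mp h).2
      have hbrest : ∀ x ∈ rest, b ≤ x :=
        fun x hx => (List.pairwise_cons.mp htail).1 x hx
      by_cases hdup : (a == b && is_small a) = true
      · have e : adjSmallDup (a :: b :: rest) = true := by
          unfold adjSmallDup; rw [if_pos hdup]
        rw [e]
        rw [Bool.and_eq_true, beq_iff_eq] at hdup
        refine iff_of_true rfl ⟨a, hdup.2, ?_⟩
        have : List.count a (a :: b :: rest) = List.count a (b :: rest) + 1 := by
          rw [List.count_cons]; simp
        have : List.count a (b :: rest) ≥ 1 := by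
          rw [List.count_cons]; simp [hdup.1]
        omega
      · have e : adjSmallDup (a :: b :: rest) = adjSmallDup (b :: rest) := by
          unfold adjSmallDup; rw [if_neg hdup]; cases rest <;> rfl
        rw [e, ih htail]
        constructor
        · rintro ⟨c, hs, hc⟩
          refine ⟨c, hs, ?_⟩
          have : List.count c (b :: rest) ≤ List.count c (a :: b :: rest) := by
            rw [List.count_cons (b := a)]; split <;> omega
          omega
        · rintro ⟨c, hs, hc⟩
          refine ⟨c, hs, ?_⟩
          by_cases hca : c = a
          · subst hca
            rw [Bool.and_eq_true, beq_iff_eq] at hdup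
            push_neg at hdup
            by_cases hcb : c = b
            · exact absurd hs (hdup hcb)
            · -- c = a ≠ b, c ≤ b ≤ rest ⇒ c occurs only once: contradiction
              have hlt : c < b := lt_of_le_of_ne hab hcb
              have hnb : List.count c (b :: rest) = 0 := by
                rw [List.count_eq_zero]
                intro hmem
                rcases List.mem_cons.mp hmem with rfl | hr
                · exact hcb rfl
                · exact absurd rfl (ne_of_lt (lt_of_lt_of_le hlt (hbrest _ hr)))
              have : List.count c (c :: b :: rest) = List.count c (b :: rest) + 1 := by
                rw [List.count_cons]; simp
              omega
          · have : List.count c (a :: b :: rest) = List.count c (b :: rest) := by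
              rw [List.count_cons]; simp [Ne.symm hca]
            omega

lemma loops_agree (path : List String) :
    (!((PySem.Dict.counter path : PySem.Dict String Int).keys.any
        (fun c => decide ((PySem.Dict.counter path : PySem.Dict String Int).getD c 0 > 1) && is_small c)))
      = !(adjSmallDup (PySem.List.sorted path (fun x => x) false)) := by
  congr 1
  have hperm : (PySem.List.sorted path (fun x => x) false).Perm path :=
    PySem.List.sorted_perm path (fun x => x) false
  have hB : adjSmallDup (PySem.List.sorted path (fun x => x) false) = true ↔
      ∃ c, is_small c = true ∧ 2 ≤ path.count c := by
    rw [adjSmallDup_iff _ (PySem.List.sorted_pairwise path (fun x => x))]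
    constructor
    · rintro ⟨c, hs, hc⟩; exact ⟨c, hs, by rwa [hperm.count_eq] at hc⟩
    · rintro ⟨c, hs, hc⟩; exact ⟨c, hs, by rwa [hperm.count_eq]⟩
  have hA : ((PySem.Dict.counter path : PySem.Dict String Int).keys.any
        (fun c => decide ((PySem.Dict.counter path : PySem.Dict String Int).getD c 0 > 1) && is_small c)) = true ↔
      ∃ c, is_small c = true ∧ 2 ≤ path.count c := by
    rw [List.any_eq_true]
    constructor
    · rintro ⟨c, hc, hp⟩
      rw [Bool.and_eq_true, decide_eq_true_iff, PySem.Dict.getD_counter] at hp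
      exact ⟨c, hp.2, by have := hp.1; omega⟩
    · rintro ⟨c, hs, hcnt⟩
      have hmem : c ∈ path := List.count_pos_iff.mp (by omega)
      refine ⟨c, ?_, ?_⟩
      · rw [PySem.Dict.keys_counter]; exact (PySem.Set.mem_ofList _ _).mpr hmem
      · rw [Bool.and_eq_true, decide_eq_true_iff, PySem.Dict.getD_counter]
        exact ⟨by omega, hs⟩
  by_cases h : ∃ c, is_small c = true ∧ 2 ≤ path.count c
  · rw [hA.mpr h, hB.mpr h]
  · cases ha : ((PySem.Dict.counter path : PySem.Dict String Int).keys.any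
        (fun c => decide ((PySem.Dict.counter path : PySem.Dict String Int).getD c 0 > 1) && is_small c)) with
    | true => exact absurd (hA.mp ha) h
    | false =>
      cases hb : adjSmallDup (PySem.List.sorted path (fun x => x) false) with
      | true => exact absurd (hB.mp hb) h
      | false => rfl

-- ===== VERDICT (by name: the statement is the Claim_ definition above) =====
theorem small_can_be_added_spec : Claim_equal_small_can_be_added := by
  intro path cave dup _
  unfold Spec_small_can_be_added small_can_be_added small_can_be_added_alt
  by_cases hend : (cave == "end") = true
  · rw [if_pos hend, if_pos hend]
  · have he : (cave == "end") = false := by simp_all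
    by_cases hmem : path.contains cave = true
    · by_cases hdup : dup = true
      · simp only [he, hmem, hdup, PySem.Dict.contains_counter, Bool.not_true,
          Bool.false_eq_true, if_false]
        exact loops_agree path
      · have hd : dup = false := by simp_all
        simp only [he, hmem, hd, PySem.Dict.contains_counter, Bool.not_true, Bool.not_false,
          Bool.false_eq_true, if_false, if_true]
    · have hm : path.contains cave = false := by simp_all
      simp only [he, hm, PySem.Dict.contains_counter, Bool.not_false, Bool.false_eq_true,
        if_false, if_true]
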